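-- pv_equiv track=rewrite | github.com/mkern75/AdventOfCodePython | year2017/Day06.py | redistribute
-- ===== SOURCE A (Python) =====
-- def redistribute(state):
--     new_state = list(state)
--     most_blocks = max(new_state)
--     idx = new_state.index(most_blocks)
--     new_state[idx] = 0
--     for i in range(1, most_blocks + 1):
--         new_state[(idx + i) % len(state)] += 1
--     return tuple(new_state)
-- ===== SOURCE B (Python) =====
-- def redistribute(state):
--     n = len(state)
--     most_blocks = max(state)
--     idx = state.index(most_blocks)
--     q, r = divmod(most_blocks, n) if most_blocks > 0 else (0, 0)
--     return tuple(
--         (0 if i == idx else state[i]) + q + (1 if (i - idx - 1) % n < r else 0)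
--         for i in range(n)
--     )
-- ===== Notes on version B (the rewrite author's own statement) =====
-- stated objective: faster
-- what changed: Instead of A's in-place simulation that hands out blocks one at a time (a loop of most_blocks iterations), B computes q, r = divmod(most_blocks, n) and builds the result as a per-cell closed form: each cell gets q plus one extra block iff it lies within the r-cell window after the source cell.
-- outside the precondition, e.g. on redistribute(()): A raises ValueError, B raises ValueError
import Mathlib
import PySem

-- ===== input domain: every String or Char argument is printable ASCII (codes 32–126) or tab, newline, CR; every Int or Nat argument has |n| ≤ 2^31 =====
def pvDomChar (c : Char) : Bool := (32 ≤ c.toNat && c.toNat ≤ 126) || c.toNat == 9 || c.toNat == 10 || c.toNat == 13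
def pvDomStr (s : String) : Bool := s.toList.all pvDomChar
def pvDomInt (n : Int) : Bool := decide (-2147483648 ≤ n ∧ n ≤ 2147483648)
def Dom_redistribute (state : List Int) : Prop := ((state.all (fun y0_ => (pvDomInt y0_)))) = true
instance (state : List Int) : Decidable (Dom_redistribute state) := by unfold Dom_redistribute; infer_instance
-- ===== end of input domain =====

-- B replaces A's in-place one-block-at-a-time loop by a per-cell closed form via divmod:
-- every cell gets q = most_blocks // n, plus one extra block iff it lies in the r-cell window
-- after the emptied cell, removing the most_blocks-step loop (objective: faster).
-- A returns a tuple of ints; per the type convention both ports return List Int.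

-- ===== PORT A =====
def redistribute (state : List Int) : List Int :=
  match PySem.List.max? state (fun y => y) with
  | none => []          -- empty list: Python's max raises ValueError (excluded by Pre_)
  | some most_blocks =>
    match PySem.List.index? state most_blocks with
    | none => []        -- unreachable: the maximum is an element of the list
    | some idx =>
      let ns := state.set idx 0
      (PySem.List.pyRange 1 (most_blocks + 1) 1).foldl
        (fun l i =>
          -- new_state[(idx + i) % len(state)] += 1 ; the index is in [0, n), so toNat is exact
          let j := (PySem.Int.mod ((idx : Int) + i) (state.length : Int)).toNat
          l.set j (l.getD j 0 + 1)) ns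

-- ===== PORT B =====
def redistribute_alt (state : List Int) : List Int :=
  match PySem.List.max? state (fun y => y) with
  | none => []          -- empty list: Python's max raises ValueError (excluded by Pre_)
  | some most_blocks =>
    match PySem.List.index? state most_blocks with
    | none => []        -- unreachable: the maximum is an element of the list
    | some idx =>
      let n : Int := state.length
      -- q, r = divmod(most_blocks, n) if most_blocks > 0 else (0, 0)
      let q := if most_blocks > 0 then PySem.Int.floordiv most_blocks n else 0
      let r := if most_blocks > 0 then PySem.Int.mod most_blocks n else 0
      -- tuple((0 if i == idx else state[i]) + q + (1 if (i - idx - 1) % n < r else 0) for i in range(n))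
      -- state[i] with i from range(n) is always in range, so pyGetD is exact here
      (PySem.List.pyRange 0 n 1).map (fun i =>
        (if i = (idx : Int) then 0 else PySem.List.pyGetD state i 0) + q
          + (if PySem.Int.mod (i - (idx : Int) - 1) n < r then 1 else 0))

-- ===== PRECONDITION & SPEC =====
-- Pre_ excludes only the empty list, on which Python's max([]) raises ValueError.
def Pre_redistribute (state : List Int) : Prop := state ≠ []
instance (state : List Int) : Decidable (Pre_redistribute state) := by unfold Pre_redistribute; infer_instance
def pvWitness_redistribute : List Int := [0, 2, 7, 0]

def Spec_redistribute (state : List Int) (out : List Int) : Prop := out = redistribute_alt state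
instance (state : List Int) (out : List Int) : Decidable (Spec_redistribute state out) := by unfold Spec_redistribute; infer_instance

-- ===== CLAIM (what is proved, stated in full; the proofs are below) =====
def Claim_equal_redistribute : Prop := ∀ (state : List Int), Dom_redistribute state → Pre_redistribute state → Spec_redistribute state (redistribute state)

-- ===== LEMMAS AND PROOFS =====

-- The common loop body: add 1 to cell j (j always in range when it arises).
def pvBump (l : List Int) (j : Nat) : List Int := l.set j (l.getD j 0 + 1)

theorem pvBump_length (l : List Int) (j : Nat) : (pvBump l j).length = l.length := by
  simp [pvBump]

theorem pvFold_length (g : Int → Nat) (js : List Int) (l : List Int) :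
    (js.foldl (fun acc i => pvBump acc (g i)) l).length = l.length := by
  induction js generalizing l with
  | nil => rfl
  | cons j t ih => simp [List.foldl_cons, ih, pvBump_length]

theorem pvBump_getD (l : List Int) (j k : Nat) (hk : k < l.length) :
    (pvBump l j).getD k 0 = l.getD k 0 + (if j = k then 1 else 0) := by
  unfold pvBump
  rw [List.getD_eq_getElem?_getD, List.getElem?_set]
  rcases eq_or_ne j k with h | h
  · subst h
    simp [hk]
  · simp [h, List.getD_eq_getElem?_getD]

-- Pointwise effect of a run of bumps: each cell gains the number of times its index occurs.
theorem pvFold_getD (g : Int → Nat) (js : List Int) (l : List Int) (k : Nat) (hk : k < l.length) :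
    (js.foldl (fun acc i => pvBump acc (g i)) l).getD k 0
      = l.getD k 0 + (js.countP (fun i => g i == k) : Int) := by
  induction js generalizing l with
  | nil => simp
  | cons j t ih =>
    rw [List.foldl_cons, ih _ (by simpa [pvBump_length] using hk),
        pvBump_getD l (g j) k hk, List.countP_cons]
    rcases eq_or_ne (g j) k with h | h
    · simp [h]
      ring
    · simp [h]

-- Over any N consecutive integers, (d + i) % N hits a given residue c exactly once.
theorem pvCycle_count (N d : Int) (hN : 0 < N) (c : Nat) (hc : (c : Int) < N) (a : Int) :
    (PySem.List.pyRange a (a + N) 1).countP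
        (fun i => (PySem.Int.mod (d + i) N).toNat == c) = 1 := by
  have hmodE : ∀ x : Int, PySem.Int.mod x N = x % N := fun x =>
    PySem.Int.mod_eq_emod_of_pos hN
  have hnn : ∀ x : Int, 0 ≤ x % N := fun x => Int.emod_nonneg x (by omega)
  have hlt : ∀ x : Int, x % N < N := fun x => Int.emod_lt_of_pos x hN
  -- replace the Nat comparison by an Int comparison
  have hp : ∀ i : Int,
      ((PySem.Int.mod (d + i) N).toNat == c) = (((d + i) % N) == (c : Int)) := by
    intro i
    rw [hmodE]
    rcases eq_or_ne ((d + i) % N) (c : Int) with h | h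
    · simp [h]
    · have h2 : ((d + i) % N).toNat ≠ c := by
        intro hcon
        have := hnn (d + i)
        apply h
        omega
      simp [h2, h]
  have hrw : (PySem.List.pyRange a (a + N) 1).countP
        (fun i => (PySem.Int.mod (d + i) N).toNat == c)
      = (PySem.List.pyRange a (a + N) 1).countP (fun i => ((d + i) % N) == (c : Int)) := by
    exact List.countP_congr (fun i _ => by rw [hp])
  rw [hrw]
  have hcount : (PySem.List.pyRange a (a + N) 1).countP (fun i => ((d + i) % N) == (c : Int))
      = List.count (c : Int) ((PySem.List.pyRange a (a + N) 1).map (fun i => (d + i) % N)) := by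
    rw [List.count, List.countP_map]
    rfl
  rw [hcount]
  -- the mapped list is a permutation of pyRange 0 N
  have hnd : ((PySem.List.pyRange a (a + N) 1).map (fun i => (d + i) % N)).Nodup := by
    apply List.Nodup.map_on _ (PySem.List.nodup_pyRange_one a (a + N))
    intro x hx y hy hxy
    rw [PySem.List.mem_pyRange_one] at hx hy
    have hdvd : N ∣ (x - y) := by
      have h0 : ((d + x) - (d + y)) % N = 0 := Int.emod_eq_emod_iff_emod_sub_eq_zero.mp hxy
      have h3 : (d + x) - (d + y) = x - y := by ring
      rw [h3] at h0
      exact Int.dvd_of_emod_eq_zero h0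
    rcases hdvd with ⟨t, ht⟩
    have ht0 : t = 0 := by
      by_contra h
      rcases lt_or_gt_of_ne h with h1 | h1
      · have : N * t ≤ -N := by nlinarith
        omega
      · have : N ≤ N * t := by nlinarith
        omega
    simp [ht0] at ht
    omega
  have hmem : ∀ x : Int, x ∈ (PySem.List.pyRange a (a + N) 1).map (fun i => (d + i) % N)
      ↔ x ∈ PySem.List.pyRange 0 N 1 := by
    intro x
    rw [List.mem_map, PySem.List.mem_pyRange_one]
    constructor
    · rintro ⟨i, _, rfl⟩
      exact ⟨hnn _, hlt _⟩
    · rintro ⟨hx0, hxN⟩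
      refine ⟨a + (x - d - a) % N, ?_, ?_⟩
      · rw [PySem.List.mem_pyRange_one]
        constructor
        · have := hnn (x - d - a); omega
        · have := hlt (x - d - a); omega
      · have : (d + (a + (x - d - a) % N)) % N = ((d + a) + (x - d - a)) % N := by
          rw [Int.emod_def (x - d - a) N]
          have : d + (a + (x - d - a - N * ((x - d - a) / N)))
              = (d + a + (x - d - a)) + N * (-((x - d - a) / N)) := by ring
          rw [this, Int.add_mul_emod_self_left]
        rw [this]
        have hxx : d + a + (x - d - a) = x := by ring
        rw [hxx]
        exact Int.emod_eq_of_lt hx0 hxN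
  have hperm : List.Perm ((PySem.List.pyRange a (a + N) 1).map (fun i => (d + i) % N))
      (PySem.List.pyRange 0 N 1) := by
    apply List.perm_of_nodup_nodup_toFinset_eq hnd (PySem.List.nodup_pyRange_one 0 N)
    ext x
    simp only [List.mem_toFinset]
    exact hmem x
  rw [hperm.count_eq]
  exact List.count_eq_one_of_mem (PySem.List.nodup_pyRange_one 0 N)
    (by rw [PySem.List.mem_pyRange_one]; omega)

-- Shifting an interval by a full period N does not change the residue counts.
theorem pvShift_count (N d : Int) (hN : 0 < N) (c : Nat) (s a : Int) :
    (PySem.List.pyRange (a + N) (a + N + s) 1).countP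
        (fun i => (PySem.Int.mod (d + i) N).toNat == c)
      = (PySem.List.pyRange a (a + s) 1).countP
        (fun i => (PySem.Int.mod (d + i) N).toNat == c) := by
  rw [PySem.List.pyRange_one (a + N) (a + N + s), PySem.List.pyRange_one a (a + s)]
  have h1 : (a + N + s - (a + N)) = s := by ring
  have h2 : (a + s - a) = s := by ring
  rw [h1, h2, List.countP_map, List.countP_map]
  apply List.countP_congr
  intro k _
  simp only [Function.comp]
  have h3 : d + (a + N + (k : Int)) = (d + (a + k)) + N := by ring
  rw [PySem.Int.mod_eq_emod_of_pos hN, PySem.Int.mod_eq_emod_of_pos hN, h3, Int.add_emod_right]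

-- Counting over an interval of length t*N + s: t full cycles plus the prefix of length s.
theorem pvCount_split (N d : Int) (hN : 0 < N) (c : Nat) (hc : (c : Int) < N)
    (s : Int) (hs : 0 ≤ s) (t : Nat) : ∀ a : Int,
    (PySem.List.pyRange a (a + t * N + s) 1).countP
        (fun i => (PySem.Int.mod (d + i) N).toNat == c)
      = t + (PySem.List.pyRange a (a + s) 1).countP
        (fun i => (PySem.Int.mod (d + i) N).toNat == c) := by
  induction t with
  | zero => intro a; simp
  | succ t ih =>
    intro a
    have h1 : a ≤ a + N := by omega
    have h2 : a + N ≤ a + (t + 1 : Nat) * N + s := by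
      have : (0 : Int) ≤ t * N := by positivity
      push_cast; nlinarith
    have hsplit : PySem.List.pyRange a (a + (t + 1 : Nat) * N + s) 1
        = PySem.List.pyRange a (a + N) 1 ++ PySem.List.pyRange (a + N) (a + (t + 1 : Nat) * N + s) 1 :=
      PySem.List.pyRange_one_append a (a + N) _ h1 h2
    have hend : a + (t + 1 : Nat) * N + s = (a + N) + t * N + s := by push_cast; ring
    rw [hsplit, List.countP_append, pvCycle_count N d hN c hc a, hend, ih (a + N),
        pvShift_count N d hN c s a]
    omega

-- In any window of fewer than N consecutive values, equal residues mod N force equality.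
theorem pvResidue_inj (N x y : Int) (hN : 0 < N) (h1 : x - y < N) (h2 : y - x < N)
    (h : x % N = y % N) : x = y := by
  have h0 : (x - y) % N = 0 := Int.emod_eq_emod_iff_emod_sub_eq_zero.mp h
  have hdvd : N ∣ (x - y) := Int.dvd_of_emod_eq_zero h0
  rcases hdvd with ⟨t, ht⟩
  have ht0 : t = 0 := by
    by_contra hc
    rcases lt_or_gt_of_ne hc with hlt | hgt
    · have : N * t ≤ -N := by nlinarith
      omega
    · have : N ≤ N * t := by nlinarith
      omega
  simp [ht0] at ht
  omega

-- The value i = 1 + (x - d - 1) % N indeed satisfies (d + i) % N = x.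
theorem pvHit (N d x : Int) (_hN : 0 < N) (h0 : 0 ≤ x) (hx : x < N) :
    (d + (1 + (x - d - 1) % N)) % N = x := by
  rw [Int.emod_def (x - d - 1) N]
  have h3 : d + (1 + (x - d - 1 - N * ((x - d - 1) / N)))
      = x + N * (-((x - d - 1) / N)) := by ring
  rw [h3, Int.add_mul_emod_self_left, Int.emod_eq_of_lt h0 hx]

-- Leftover prefix [1, r]: cell c gets one extra block iff it lies within r steps after d.
theorem pvPrefix_count (N d : Int) (hN : 0 < N) (c : Nat) (hc : (c : Int) < N)
    (r : Int) (_hr0 : 0 ≤ r) (hrN : r < N) :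
    (PySem.List.pyRange 1 (r + 1) 1).countP
        (fun i => (PySem.Int.mod (d + i) N).toNat == c)
      = if PySem.Int.mod ((c : Int) - d - 1) N < r then 1 else 0 := by
  have hmodE : ∀ x : Int, PySem.Int.mod x N = x % N := fun x => PySem.Int.mod_eq_emod_of_pos hN
  rw [hmodE ((c : Int) - d - 1)]
  set m : Int := ((c : Int) - d - 1) % N with hm
  have hm0 : 0 ≤ m := Int.emod_nonneg _ (by omega)
  have hmN : m < N := Int.emod_lt_of_pos _ hN
  have hsat : (d + (m + 1)) % N = (c : Int) := by
    have hhit := pvHit N d (c : Int) hN (by positivity) hc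
    rw [show d + (m + 1) = d + (1 + m) by ring, hm]
    exact hhit
  have hp : ∀ i : Int, ((PySem.Int.mod (d + i) N).toNat == c) = true ↔ (d + i) % N = (c : Int) := by
    intro i
    rw [hmodE]
    have hnn : 0 ≤ (d + i) % N := Int.emod_nonneg _ (by omega)
    constructor
    · intro h
      have h2 : ((d + i) % N).toNat = c := by simpa using h
      omega
    · intro h
      simp [h]
  have huniq : ∀ i : Int, 1 ≤ i → i ≤ N → (d + i) % N = (c : Int) → i = m + 1 := by
    intro i h1 h2 hsati
    have := pvResidue_inj N (d + i) (d + (m + 1)) hN (by omega) (by omega)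
      (by rw [hsati, hsat])
    omega
  by_cases hcase : m < r
  · rw [if_pos hcase]
    rw [PySem.List.pyRange_one_append 1 (m + 1) (r + 1) (by omega) (by omega),
        PySem.List.pyRange_one_append (m + 1) (m + 2) (r + 1) (by omega) (by omega),
        List.countP_append, List.countP_append]
    have hz1 : (PySem.List.pyRange 1 (m + 1) 1).countP
        (fun i => (PySem.Int.mod (d + i) N).toNat == c) = 0 := by
      apply List.countP_eq_zero.mpr
      intro i hi
      rw [PySem.List.mem_pyRange_one] at hi
      intro hpi
      have := huniq i (by omega) (by omega) ((hp i).mp hpi)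
      omega
    have hz3 : (PySem.List.pyRange (m + 2) (r + 1) 1).countP
        (fun i => (PySem.Int.mod (d + i) N).toNat == c) = 0 := by
      apply List.countP_eq_zero.mpr
      intro i hi
      rw [PySem.List.mem_pyRange_one] at hi
      intro hpi
      have := huniq i (by omega) (by omega) ((hp i).mp hpi)
      omega
    have hone : (PySem.List.pyRange (m + 1) (m + 2) 1).countP
        (fun i => (PySem.Int.mod (d + i) N).toNat == c) = 1 := by
      rw [show m + 2 = (m + 1) + 1 by ring, PySem.List.pyRange_one_singleton]
      simp only [List.countP_cons, List.countP_nil]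
      rw [if_pos ((hp (m + 1)).mpr hsat)]
    rw [hz1, hz3, hone]
  · rw [if_neg hcase]
    apply List.countP_eq_zero.mpr
    intro i hi
    rw [PySem.List.mem_pyRange_one] at hi
    intro hpi
    have := huniq i (by omega) (by omega) ((hp i).mp hpi)
    omega

-- ===== VERDICT (by name: the statement is the Claim_ definition above) =====
theorem redistribute_spec : Claim_equal_redistribute := by
  intro state _ hpre
  unfold Spec_redistribute redistribute redistribute_alt
  cases hmax : PySem.List.max? state (fun y => y) with
  | none => rfl
  | some mb =>
    cases hidx : PySem.List.index? state mb with
    | none => simp only [hidx]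
    | some idx =>
      simp only [hidx]
      obtain ⟨hidxlt, -⟩ := PySem.List.getElem_of_index?_eq_some hidx
      have hn : 0 < state.length := List.length_pos_of_ne_nil hpre
      have hN : (0 : Int) < (state.length : Int) := by exact_mod_cast hn
      by_cases hmb : mb > 0
      · -- positive maximum: q full rounds for every cell plus the r-step leftover window
        simp only [if_pos hmb]
        rw [PySem.Int.floordiv_eq_ediv_of_pos hN, PySem.Int.mod_eq_emod_of_pos hN]
        set N : Int := (state.length : Int) with hNdef
        set q : Int := mb / N with hq
        set r : Int := mb % N with hr
        have hq0 : 0 ≤ q := Int.ediv_nonneg (by omega) (by omega)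
        have hr0 : 0 ≤ r := Int.emod_nonneg mb (by omega)
        have hrN : r < N := Int.emod_lt_of_pos mb hN
        have hqr : N * q + r = mb := Int.mul_ediv_add_emod mb N
        set base := state.set idx 0 with hbase
        have hbl : base.length = state.length := by simp [hbase]
        show (PySem.List.pyRange 1 (mb + 1) 1).foldl
              (fun acc i => pvBump acc ((PySem.Int.mod ((idx : Int) + i) N).toNat)) base
            = (PySem.List.pyRange 0 N 1).map (fun i =>
                (if i = (idx : Int) then 0 else PySem.List.pyGetD state i 0) + q
                  + (if PySem.Int.mod (i - (idx : Int) - 1) N < r then 1 else 0))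
        apply List.ext_getElem
        · rw [pvFold_length, List.length_map, PySem.List.length_pyRange_one, hbl, hNdef]
          omega
        · intro k hk1 hk2
          have hkb : k < base.length := by
            have h := hk1; rwa [pvFold_length] at h
          have hkN : ((k : Int)) < N := by
            rw [hNdef]; exact_mod_cast (hbl ▸ hkb)
          rw [← List.getD_eq_getElem _ 0 hk1, pvFold_getD _ _ _ _ hkb, List.getElem_map]
          have hkr : (PySem.List.pyRange 0 N 1)[k]'(by
              rw [PySem.List.length_pyRange_one]; omega) = (k : Int) := by
            rw [PySem.List.getElem_pyRange_one]
            ring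
          rw [hkr]
          have hbaseD : base.getD k 0
              = (if (k : Int) = (idx : Int) then 0 else PySem.List.pyGetD state (k : Int) 0) := by
            rw [PySem.List.pyGetD_natCast, List.getD_eq_getElem _ 0 hkb]
            rcases eq_or_ne k idx with he | he
            · subst he
              simp [hbase]
            · rw [if_neg (by simpa using he), List.getD_eq_getElem _ 0 (hbl ▸ hkb)]
              simp [hbase, List.getElem_set_ne (Ne.symm he)]
          have hsplit := pvCount_split N (idx : Int) hN k hkN r hr0 q.toNat 1
          have hend : (1 : Int) + (q.toNat : Int) * N + r = mb + 1 := by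
            have hqq : (q.toNat : Int) = q := Int.toNat_of_nonneg hq0
            rw [hqq, mul_comm]; omega
          rw [hend, show (1 : Int) + r = r + 1 by ring,
              pvPrefix_count N (idx : Int) hN k hkN r hr0 hrN] at hsplit
          rw [hsplit, hbaseD]
          have hqq : (q.toNat : Int) = q := Int.toNat_of_nonneg hq0
          push_cast [hqq]
          split_ifs <;> ring
      · -- most_blocks ≤ 0: no blocks move; every cell keeps its value (the max cell becomes 0)
        simp only [if_neg hmb]
        rw [PySem.List.pyRange_one_eq_nil (by omega : mb + 1 ≤ 1), List.foldl_nil]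
        apply List.ext_getElem
        · rw [List.length_set, List.length_map, PySem.List.length_pyRange_one]
          omega
        · intro k hk1 hk2
          have hkb : k < state.length := by simpa using hk1
          rw [List.getElem_map]
          have hkr : (PySem.List.pyRange 0 (state.length : Int) 1)[k]'(by
              rw [PySem.List.length_pyRange_one]; omega) = (k : Int) := by
            rw [PySem.List.getElem_pyRange_one]
            ring
          rw [hkr]
          have hind : ¬ (PySem.Int.mod ((k : Int) - (idx : Int) - 1) (state.length : Int) < 0) := by
            rw [PySem.Int.mod_eq_emod_of_pos hN]
            exact not_lt.mpr (Int.emod_nonneg _ (by omega))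
          rw [if_neg hind]
          rcases eq_or_ne k idx with he | he
          · subst he
            simp
          · rw [List.getElem_set_ne (Ne.symm he), if_neg (by simpa using he),
                PySem.List.pyGetD_natCast, List.getD_eq_getElem _ 0 hkb]
            ring
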